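-- pv_equiv track=rewrite | github.com/CoderOfTyros/azure-ai-chatbot | document_intelligence/di_main.py | _mask_conn_str
-- ===== SOURCE A (Python) =====
-- def _mask_conn_str(cs: str) -> str:
--     if not cs:
--         return ""
--     # keep account name visible, mask keys
--     parts = cs.split(";")
--     masked = []
--     for p in parts:
--         if p.startswith("AccountKey=") or p.startswith("SharedAccessSignature="):
--             k, _, v = p.partition("=")
--             masked.append(f"{k}=***masked***")
--         else:
--             masked.append(p)
--     return ";".join(masked)
-- ===== SOURCE B (Python) =====
-- def _mask_conn_str(cs: str) -> str:
--     if not cs: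
--         return ""
--     head, sep, rest = cs.partition(";")
--     if head.startswith("AccountKey="):
--         head = "AccountKey=***masked***"
--     elif head.startswith("SharedAccessSignature="):
--         head = "SharedAccessSignature=***masked***"
--     return head + ";" + _mask_conn_str(rest) if sep else head
-- ===== Notes on version B (the rewrite author's own statement) =====
-- stated objective: alternative
-- what changed: Replaces split-into-list / accumulate-loop / join with a direct recursion that peels one semicolon-delimited segment at a time via str.partition and masks it in place, never materialising a parts list.
import Mathlib
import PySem

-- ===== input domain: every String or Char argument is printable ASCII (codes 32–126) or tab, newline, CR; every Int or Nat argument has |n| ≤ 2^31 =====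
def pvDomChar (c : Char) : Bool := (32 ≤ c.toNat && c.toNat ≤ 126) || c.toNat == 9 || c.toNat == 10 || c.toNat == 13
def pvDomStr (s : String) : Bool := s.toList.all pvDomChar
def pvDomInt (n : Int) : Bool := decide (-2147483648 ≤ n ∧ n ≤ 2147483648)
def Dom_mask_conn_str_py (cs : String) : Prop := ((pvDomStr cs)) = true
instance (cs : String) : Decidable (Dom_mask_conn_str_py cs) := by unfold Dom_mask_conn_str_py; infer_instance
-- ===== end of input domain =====

-- B recurses on the string with partition(';') instead of A's split/loop/join over a parts list; return values proved equal on all inputs.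

-- ===== PORT A =====
-- exact port of p.partition("=") for the single-char separator '=': split at the FIRST '='
def pyPartitionEq (s : List Char) : List Char × List Char × List Char :=
  match s.dropWhile (· != '=') with
  | [] => (s, [], [])
  | _ :: t => (s.takeWhile (· != '='), ['='], t)

def maskPartA (p : List Char) : List Char :=
  if PySem.Chars.startswith p "AccountKey=".toList || PySem.Chars.startswith p "SharedAccessSignature=".toList then
    (pyPartitionEq p).1 ++ "=***masked***".toList
  else p

def mask_conn_str_py (cs : String) : String :=
  if cs.toList = [] then ""
  else
    let parts := PySem.Chars.splitOn cs.toList [';']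
    let masked := parts.foldl (fun acc p => acc ++ [maskPartA p]) []
    String.mk (PySem.Chars.join [';'] masked)

-- ===== PORT B =====
def maskSegB (p : List Char) : List Char :=
  if PySem.Chars.startswith p "AccountKey=".toList then "AccountKey=***masked***".toList
  else if PySem.Chars.startswith p "SharedAccessSignature=".toList then "SharedAccessSignature=***masked***".toList
  else p

-- cs.partition(";") ported as takeWhile/dropWhile at the first ';' (exact for a single-char separator)
def goB (l : List Char) : List Char :=
  if l = [] then []
  else
    if _hr : l.dropWhile (· != ';') = [] then maskSegB (l.takeWhile (· != ';'))
    else maskSegB (l.takeWhile (· != ';')) ++ ';' :: goB (l.dropWhile (· != ';')).tail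
termination_by l.length
decreasing_by
  have h := List.length_dropWhile_le (fun c => c != ';') l
  have h2 : (l.dropWhile (· != ';')).length ≠ 0 := by simpa [List.length_eq_zero_iff] using _hr
  simp only [List.length_tail]; omega

def mask_conn_str_py_alt (cs : String) : String := String.mk (goB cs.toList)

-- ===== PRECONDITION & SPEC =====
def Spec_mask_conn_str_py (cs : String) (out : String) : Prop := out = mask_conn_str_py_alt cs
instance (cs : String) (out : String) : Decidable (Spec_mask_conn_str_py cs out) := by unfold Spec_mask_conn_str_py; infer_instance

-- ===== CLAIM (what is proved, stated in full; the proofs are below) =====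
def Claim_equal_mask_conn_str_py : Prop := ∀ (cs : String), Dom_mask_conn_str_py cs → Spec_mask_conn_str_py cs (mask_conn_str_py cs)

-- ===== LEMMAS AND PROOFS =====

-- spec of splitOn.go for the single-char separator ';' with an accumulated current segment
def Pspec2 (l cur : List Char) : List (List Char) :=
  if _hr : l.dropWhile (· != ';') = [] then [cur.reverse ++ l.takeWhile (· != ';')]
  else (cur.reverse ++ l.takeWhile (· != ';')) :: Pspec2 (l.dropWhile (· != ';')).tail []
termination_by l.length
decreasing_by
  have h := List.length_dropWhile_le (fun c => c != ';') l
  have h2 : (l.dropWhile (· != ';')).length ≠ 0 := by simpa [List.length_eq_zero_iff] using _hr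
  simp only [List.length_tail]; omega

lemma Pspec2_nil (cur : List Char) : Pspec2 [] cur = [cur.reverse] := by
  rw [Pspec2.eq_def]; simp

lemma Pspec2_semi (rest cur : List Char) :
    Pspec2 (';' :: rest) cur = cur.reverse :: Pspec2 rest [] := by
  rw [Pspec2.eq_def]
  simp

lemma Pspec2_cons {c : Char} (hc : (c != ';') = true) (rest cur : List Char) :
    Pspec2 (c :: rest) cur = Pspec2 rest (c :: cur) := by
  rw [Pspec2.eq_def]
  conv_rhs => rw [Pspec2.eq_def]
  simp only [List.dropWhile_cons, List.takeWhile_cons, hc, if_pos]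
  split_ifs <;> simp

lemma Pspec2_ne_nil (l cur : List Char) : Pspec2 l cur ≠ [] := by
  rw [Pspec2.eq_def]; split_ifs <;> simp

lemma go_eq (fuel : Nat) : ∀ (l cur : List Char) (acc : List (List Char)), l.length < fuel →
    PySem.Chars.splitOn.go [';'] fuel l cur acc = acc.reverse ++ Pspec2 l cur := by
  induction fuel with
  | zero => intro l cur acc h; omega
  | succ fuel ih =>
    intro l cur acc h
    cases l with
    | nil =>
      rw [PySem.Chars.splitOn.go.eq_def]
      simp [Pspec2_nil]
    | cons c rest =>
      rw [PySem.Chars.splitOn.go.eq_def]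
      by_cases hc : c = ';'
      · subst hc
        have hpre : [';'].isPrefixOf (';' :: rest) = true := by simp [List.isPrefixOf]
        simp only [hpre, if_pos, List.length_cons, List.length_nil, List.drop_succ_cons,
          List.drop_zero]
        rw [ih rest [] (cur.reverse :: acc) (by simp at h; omega)]
        simp [Pspec2_semi]
      · have hpre : [';'].isPrefixOf (c :: rest) = false := by
          simp [List.isPrefixOf]; exact fun hh => absurd hh.symm hc
        simp only [hpre, Bool.false_eq_true, if_neg, not_false_iff]
        rw [ih rest (c :: cur) acc (by simp at h; omega)]
        rw [Pspec2_cons (by simp [hc]) rest cur]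

lemma splitOn_eq (l : List Char) : PySem.Chars.splitOn l [';'] = Pspec2 l [] := by
  rw [PySem.Chars.splitOn, go_eq (l.length + 1) l [] [] (by omega)]
  simp

lemma foldl_concat_eq_map (f : List Char → List Char) (l : List (List Char)) :
    ∀ acc, l.foldl (fun acc p => acc ++ [f p]) acc = acc ++ l.map f := by
  induction l with
  | nil => simp
  | cons x xs ih => intro acc; simp [List.foldl_cons, ih]

lemma maskPartA_eq_maskSegB (p : List Char) : maskPartA p = maskSegB p := by
  rw [maskPartA, maskSegB]
  by_cases h1 : PySem.Chars.startswith p "AccountKey=".toList = true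
  · obtain ⟨t, rfl⟩ := (PySem.Chars.startswith_iff _ _).mp h1
    simp only [h1, Bool.true_or, if_pos]
    rw [pyPartitionEq.eq_def]
    have hd : List.dropWhile (· != '=') ("AccountKey=".toList ++ t) = '=' :: t := by simp
    rw [hd]
    simp
  · by_cases h2 : PySem.Chars.startswith p "SharedAccessSignature=".toList = true
    · obtain ⟨t, rfl⟩ := (PySem.Chars.startswith_iff _ _).mp h2
      have h1' : PySem.Chars.startswith ("SharedAccessSignature=".toList ++ t)
          "AccountKey=".toList = false := by
        rw [Bool.eq_false_iff]; intro hh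
        obtain ⟨u, hu⟩ := (PySem.Chars.startswith_iff _ _).mp hh
        simp at hu
      simp only [h1', Bool.false_eq_true, h2, if_pos]
      rw [pyPartitionEq.eq_def]
      have hd : List.dropWhile (· != '=') ("SharedAccessSignature=".toList ++ t) = '=' :: t := by
        simp
      rw [hd]
      simp
    · rw [Bool.not_eq_true] at h1 h2
      simp at h1 h2
      simp [h1, h2]

lemma join_map_Pspec2 (n : Nat) : ∀ (l : List Char), l.length ≤ n →
    PySem.Chars.join [';'] ((Pspec2 l []).map maskPartA) = goB l := by
  induction n with
  | zero =>
    intro l h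
    have hl : l = [] := List.length_eq_zero_iff.mp (by omega)
    subst hl
    rw [Pspec2_nil, goB.eq_def]
    simp [PySem.Chars.join_singleton, maskPartA_eq_maskSegB, maskSegB, PySem.Chars.startswith]
  | succ n ih =>
    intro l h
    rw [goB.eq_def, Pspec2.eq_def]
    by_cases hd : l.dropWhile (· != ';') = []
    · by_cases hnil : l = []
      · subst hnil
        simp [hd, PySem.Chars.join_singleton, maskPartA_eq_maskSegB, maskSegB,
          PySem.Chars.startswith]
      · simp [hd, hnil, PySem.Chars.join_singleton, maskPartA_eq_maskSegB]
    · have hnil : l ≠ [] := by intro e; subst e; simp at hd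
      simp only [hd, hnil, dif_neg, not_false_iff, if_neg, List.map_cons, List.reverse_nil,
        List.nil_append]
      have ht : (l.dropWhile (· != ';')).tail.length ≤ n := by
        have h1 := List.length_dropWhile_le (fun c => c != ';') l
        have h2 : (l.dropWhile (· != ';')).length ≠ 0 := by
          simpa [List.length_eq_zero_iff] using hd
        have h3 : l.length ≠ 0 := by simpa [List.length_eq_zero_iff] using hnil
        simp only [List.length_tail]; omega
      rw [← ih _ ht]
      obtain ⟨y, ys, hys⟩ : ∃ y ys, Pspec2 (l.dropWhile (· != ';')).tail [] = y :: ys := by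
        cases hq : Pspec2 (l.dropWhile (· != ';')).tail [] with
        | nil => exact absurd hq (Pspec2_ne_nil _ [])
        | cons y ys => exact ⟨y, ys, rfl⟩
      rw [hys, List.map_cons, PySem.Chars.join_cons_cons]
      simp [maskPartA_eq_maskSegB]

-- ===== VERDICT (by name: the statement is the Claim_ definition above) =====
theorem mask_conn_str_py_spec : Claim_equal_mask_conn_str_py := by
  intro cs _
  unfold Spec_mask_conn_str_py mask_conn_str_py mask_conn_str_py_alt
  by_cases h : cs.toList = []
  · rw [if_pos h, h, goB.eq_def]
    simp
    rfl
  · rw [if_neg h]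
    simp only []
    rw [splitOn_eq, foldl_concat_eq_map, List.nil_append,
      join_map_Pspec2 cs.toList.length cs.toList (le_refl _)]
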